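-- pv_equiv track=rewrite | github.com/ralbu/coding-skills-adam | python/workout/ex1/ex7_ubbi_dubbi.py | ubbi_dubbi_word
-- ===== SOURCE A (Python) =====
-- vowels = ['a', 'e', 'i', 'o', 'u']
--
-- def ubbi_dubbi_word(word):
--     # ub before vowels
--     translated_word = []
--     for character in word:
--         if character in vowels:
--             translated_word.append('ub' + character)
--         else:
--             translated_word.append(character)
--
--     translated_word = ''.join(translated_word)
--     return translated_word
-- ===== SOURCE B (Python) =====
-- import re
--
-- def ubbi_dubbi_word(word):
--     return re.sub('[aeiou]', lambda m: 'ub' + m.group(0), word)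
-- ===== Notes on version B (the rewrite author's own statement) =====
-- stated objective: idiomatic
-- what changed: Replaces the explicit character loop with list-building and join by a single re.sub over the vowel class with a replacement callback.
import Mathlib
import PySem

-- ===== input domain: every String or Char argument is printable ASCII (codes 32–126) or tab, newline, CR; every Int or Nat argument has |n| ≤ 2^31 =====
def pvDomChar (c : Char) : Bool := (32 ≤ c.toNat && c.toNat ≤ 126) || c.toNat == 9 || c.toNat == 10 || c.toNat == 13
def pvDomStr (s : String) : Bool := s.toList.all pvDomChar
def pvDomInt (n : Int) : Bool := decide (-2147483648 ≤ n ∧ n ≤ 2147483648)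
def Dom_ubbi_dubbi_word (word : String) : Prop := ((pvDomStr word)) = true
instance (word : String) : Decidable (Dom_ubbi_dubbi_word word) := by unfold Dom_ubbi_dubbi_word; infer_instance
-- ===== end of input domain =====

-- B replaces the explicit loop+join with a regex-style single substitution pass (idiomatic; same behaviour).


-- ===== PORT A =====
def pvVowels : List Char := ['a', 'e', 'i', 'o', 'u']

-- loop: append 'ub'+c or c to the accumulator list, then join
def ubbi_dubbi_word (word : String) : String :=
  let translated_word : List String :=
    word.toList.foldl (fun acc character =>
      if character ∈ pvVowels then acc ++ [String.ofList ['u', 'b', character]]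
      else acc ++ [String.ofList [character]]) []
  String.ofList (PySem.Chars.join [] (translated_word.map String.toList))

-- ===== PORT B =====
-- re.sub('[aeiou]', lambda m: 'ub' + m.group(0), word): one left-to-right scan,
-- each character matching the class is replaced by 'ub'+itself, others are copied.
def pvReSubVowels : List Char → List Char
  | [] => []
  | c :: rest =>
      if c ∈ pvVowels then 'u' :: 'b' :: c :: pvReSubVowels rest
      else c :: pvReSubVowels rest

def ubbi_dubbi_word_alt (word : String) : String :=
  String.ofList (pvReSubVowels word.toList)

-- ===== PRECONDITION & SPEC =====
def Spec_ubbi_dubbi_word (word : String) (out : String) : Prop := out = ubbi_dubbi_word_alt word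
instance (word : String) (out : String) : Decidable (Spec_ubbi_dubbi_word word out) := by unfold Spec_ubbi_dubbi_word; infer_instance

-- ===== CLAIM (what is proved, stated in full; the proofs are below) =====
def Claim_equal_ubbi_dubbi_word : Prop := ∀ (word : String), Dom_ubbi_dubbi_word word → Spec_ubbi_dubbi_word word (ubbi_dubbi_word word)

-- ===== LEMMAS AND PROOFS =====

-- [].join over char lists is flatten
theorem pvJoinNil (ls : List (List Char)) : PySem.Chars.join [] ls = ls.flatten := by
  induction ls with
  | nil => simp [PySem.Chars.join_nil]
  | cons p rest ih =>
      cases rest with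
      | nil => simp [PySem.Chars.join_singleton]
      | cons q r => simp [PySem.Chars.join_cons_cons, ih]

-- A's foldl with a pre-seeded accumulator, flattened to chars, equals acc's chars ++ B's scan
theorem pvFold_eq (cs : List Char) (acc : List String) :
    ((cs.foldl (fun acc character =>
        if character ∈ pvVowels then acc ++ [String.ofList ['u', 'b', character]]
        else acc ++ [String.ofList [character]]) acc).map String.toList).flatten
    = (acc.map String.toList).flatten ++ pvReSubVowels cs := by
  induction cs generalizing acc with
  | nil => simp [pvReSubVowels]
  | cons c rest ih =>
      simp only [List.foldl, pvReSubVowels]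
      by_cases h : c ∈ pvVowels <;> simp [h, ih]

-- ===== VERDICT (by name: the statement is the Claim_ definition above) =====
theorem ubbi_dubbi_word_spec : Claim_equal_ubbi_dubbi_word := by
  intro word _
  unfold Spec_ubbi_dubbi_word ubbi_dubbi_word ubbi_dubbi_word_alt
  show String.ofList (PySem.Chars.join [] _) = _
  rw [pvJoinNil, pvFold_eq]
  simp
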